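-- pv_equiv track=rewrite | github.com/mfagerlund/rectangular-surface-parameterization | tests/test_quad_extractor.py | check_manifold
-- ===== SOURCE A (Python) =====
-- from collections import defaultdict
--
-- def check_manifold(quads):
--     """Return (n_boundary, n_non_manifold) edge counts."""
--     edge_count = defaultdict(int)
--     for q in quads:
--         for i in range(4):
--             e = (min(q[i], q[(i + 1) % 4]), max(q[i], q[(i + 1) % 4]))
--             edge_count[e] += 1
--     boundary = sum(1 for c in edge_count.values() if c == 1)
--     non_manifold = sum(1 for c in edge_count.values() if c > 2)
--     return boundary, non_manifold
-- ===== SOURCE B (Python) =====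
-- def check_manifold(quads):
--     """Return (n_boundary, n_non_manifold) edge counts."""
--     edges = []
--     for a, b, c, d in quads:
--         for u, v in ((a, b), (b, c), (c, d), (d, a)):
--             edges.append((u, v) if u <= v else (v, u))
--     edges.sort()
--     boundary = 0
--     non_manifold = 0
--     prev = None
--     run = 0
--     for e in edges:
--         if e == prev:
--             run += 1
--         else:
--             if run == 1:
--                 boundary += 1
--             elif run > 2:
--                 non_manifold += 1
--             prev = e
--             run = 1
--     if run == 1:
--         boundary += 1
--     elif run > 2:
--         non_manifold += 1
--     return boundary, non_manifold
-- ===== Notes on version B (the rewrite author's own statement) =====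
-- stated objective: alternative
-- what changed: Replaces the hash-map edge counter and its two value passes with a flat normalized-edge list that is sorted once and scanned in a single run-length pass, classifying each run as boundary (length 1) or non-manifold (length > 2).
import Mathlib
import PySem

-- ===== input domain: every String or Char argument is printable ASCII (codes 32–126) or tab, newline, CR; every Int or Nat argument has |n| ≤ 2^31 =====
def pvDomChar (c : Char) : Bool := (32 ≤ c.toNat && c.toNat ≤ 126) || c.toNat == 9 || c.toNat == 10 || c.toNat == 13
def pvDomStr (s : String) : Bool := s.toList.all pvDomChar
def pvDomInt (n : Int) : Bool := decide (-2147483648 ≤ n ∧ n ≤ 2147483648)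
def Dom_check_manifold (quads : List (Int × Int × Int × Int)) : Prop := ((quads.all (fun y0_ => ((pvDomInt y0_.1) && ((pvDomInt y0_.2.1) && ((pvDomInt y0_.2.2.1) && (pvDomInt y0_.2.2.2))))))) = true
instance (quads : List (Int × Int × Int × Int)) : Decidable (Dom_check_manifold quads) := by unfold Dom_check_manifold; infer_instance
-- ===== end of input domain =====

-- B replaces A's hash-map edge counter and its two value passes with a sort of the
-- flat normalized-edge list followed by a single run-length scan (alternative algorithm,
-- same results; no speed claim).

-- ===== PORT A =====
-- q[i] for the indices 0..3 that A's loop produces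
def tupGet (q : Int × Int × Int × Int) (i : Int) : Int :=
  if i = 0 then q.1 else if i = 1 then q.2.1 else if i = 2 then q.2.2.1 else q.2.2.2

def check_manifold (quads : List (Int × Int × Int × Int)) : Int × Int :=
  let edge_count : PySem.Dict (Int × Int) Int :=
    quads.foldl (fun d q =>
      (PySem.List.pyRange 0 4 1).foldl (fun d i =>
        let e := (min (tupGet q i) (tupGet q (PySem.Int.mod (i + 1) 4)),
                  max (tupGet q i) (tupGet q (PySem.Int.mod (i + 1) 4)))
        d.modify e 0 (· + 1)) d) PySem.Dict.empty
  let boundary : Int := edge_count.values.foldl (fun acc c => if c == 1 then acc + 1 else acc) 0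
  let non_manifold : Int := edge_count.values.foldl (fun acc c => if c > 2 then acc + 1 else acc) 0
  (boundary, non_manifold)

-- ===== PORT B =====
-- (u, v) if u <= v else (v, u)
def normEdge (u v : Int) : Int × Int := if u ≤ v then (u, v) else (v, u)

-- the edge-collection loop of Source B
def edgesB (quads : List (Int × Int × Int × Int)) : List (Int × Int) :=
  quads.foldl (fun acc q =>
    [(q.1, q.2.1), (q.2.1, q.2.2.1), (q.2.2.1, q.2.2.2), (q.2.2.2, q.1)].foldl
      (fun acc uv => acc ++ [normEdge uv.1 uv.2]) acc) []

-- the trailing if/elif that closes a run (also flushes the final run)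
def bump (run b nm : Int) : Int × Int :=
  if run == 1 then (b + 1, nm) else if run > 2 then (b, nm + 1) else (b, nm)

-- one iteration of Source B's scan loop; state = (prev, run, boundary, non_manifold)
def stepB (st : Option (Int × Int) × Int × Int × Int) (e : Int × Int) :
    Option (Int × Int) × Int × Int × Int :=
  if some e == st.1 then (st.1, st.2.1 + 1, st.2.2.1, st.2.2.2)
  else
    let p := bump st.2.1 st.2.2.1 st.2.2.2
    (some e, 1, p.1, p.2)

def check_manifold_alt (quads : List (Int × Int × Int × Int)) : Int × Int :=
  let edges := PySem.List.sorted2 (edgesB quads) (fun e => e.1) (fun e => e.2)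
  let st := edges.foldl stepB (none, 0, 0, 0)
  bump st.2.1 st.2.2.1 st.2.2.2

-- ===== PRECONDITION & SPEC =====
def Spec_check_manifold (quads : List (Int × Int × Int × Int)) (out : Int × Int) : Prop := out = check_manifold_alt quads
instance (quads : List (Int × Int × Int × Int)) (out : Int × Int) : Decidable (Spec_check_manifold quads out) := by unfold Spec_check_manifold; infer_instance

-- ===== CLAIM (what is proved, stated in full; the proofs are below) =====
def Claim_equal_check_manifold : Prop := ∀ (quads : List (Int × Int × Int × Int)), Dom_check_manifold quads → Spec_check_manifold quads (check_manifold quads)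

-- ===== LEMMAS AND PROOFS =====

-- the multiset of normalized edges, quad by quad
def edgesOf (q : Int × Int × Int × Int) : List (Int × Int) :=
  [(min q.1 q.2.1, max q.1 q.2.1), (min q.2.1 q.2.2.1, max q.2.1 q.2.2.1),
   (min q.2.2.1 q.2.2.2, max q.2.2.1 q.2.2.2), (min q.2.2.2 q.1, max q.2.2.2 q.1)]

def edgesAll (quads : List (Int × Int × Int × Int)) : List (Int × Int) :=
  quads.flatMap edgesOf

-- the common value: per distinct edge, classify its multiplicity
def specPair (L : List (Int × Int)) : Int × Int :=
  (((PySem.Set.ofList L).countP (fun k => ((L.count k : Int) == 1)) : Int),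
   ((PySem.Set.ofList L).countP (fun k => decide ((2:Int) < (L.count k : Int))) : Int))

-- reference run-length scan, run by run
def runsR : List (Int × Int) → Int × Int
  | [] => (0, 0)
  | e :: xs =>
    let p := bump (1 + ((xs.takeWhile (· == e)).length : Int)) 0 0
    let r := runsR (xs.dropWhile (· == e))
    (p.1 + r.1, p.2 + r.2)
  termination_by L => L.length
  decreasing_by
    simp only [List.length_cons]
    exact Nat.lt_succ_of_le (List.length_dropWhile_le _ _)

theorem runsR_nil : runsR [] = (0, 0) := by rw [runsR]

theorem runsR_cons (e : Int × Int) (xs : List (Int × Int)) :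
    runsR (e :: xs) =
      ((bump (1 + ((xs.takeWhile (· == e)).length : Int)) 0 0).1 +
        (runsR (xs.dropWhile (· == e))).1,
       (bump (1 + ((xs.takeWhile (· == e)).length : Int)) 0 0).2 +
        (runsR (xs.dropWhile (· == e))).2) := by rw [runsR]

-- the strict lexicographic order sorted2 uses
def lexLt (a b : Int × Int) : Bool :=
  decide (a.1 < b.1) || (!decide (b.1 < a.1) && decide (a.2 < b.2))

theorem lexLt_asym (a b : Int × Int) : lexLt a b = true → lexLt b a = false := by
  simp [lexLt]; omega

theorem lexLt_trans (a b c : Int × Int) :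
    lexLt a b = true → lexLt b c = true → lexLt a c = true := by
  simp [lexLt]; omega

theorem lexLt_antisym (a b : Int × Int) :
    lexLt a b = false → lexLt b a = false → a = b := by
  obtain ⟨a1, a2⟩ := a; obtain ⟨b1, b2⟩ := b
  simp [lexLt]; omega

theorem insertBy_pairwise (x : Int × Int) (l : List (Int × Int))
    (hl : l.Pairwise (fun a b => lexLt b a = false)) :
    (PySem.List.insertBy lexLt x l).Pairwise (fun a b => lexLt b a = false) := by
  induction l with
  | nil => simp [PySem.List.insertBy]
  | cons y ys ih =>
    rw [List.pairwise_cons] at hl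
    obtain ⟨hy, hys⟩ := hl
    by_cases h : lexLt x y = true
    · rw [show PySem.List.insertBy lexLt x (y :: ys) = x :: y :: ys by
        simp [PySem.List.insertBy, h]]
      refine List.Pairwise.cons ?_ (List.Pairwise.cons hy hys)
      intro z hz
      rcases List.mem_cons.mp hz with rfl | hz
      · exact lexLt_asym _ _ h
      · by_contra hc
        have hzx : lexLt z x = true := by
          cases hzx : lexLt z x with
          | true => rfl
          | false => exact absurd hzx hc
        have := lexLt_trans z x y hzx h
        rw [hy z hz] at this; exact Bool.false_ne_true this
    · rw [show PySem.List.insertBy lexLt x (y :: ys) = y :: PySem.List.insertBy lexLt x ys by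
        simp [PySem.List.insertBy, h]]
      refine List.Pairwise.cons ?_ (ih hys)
      intro z hz
      rw [PySem.List.mem_insertBy] at hz
      rcases hz with rfl | hz
      · simpa using h
      · exact hy z hz

theorem foldl_insertBy_pairwise (xs acc : List (Int × Int))
    (hacc : acc.Pairwise (fun a b => lexLt b a = false)) :
    (xs.foldl (fun acc x => PySem.List.insertBy lexLt x acc) acc).Pairwise
      (fun a b => lexLt b a = false) := by
  induction xs generalizing acc with
  | nil => exact hacc
  | cons x xs ih => exact ih _ (insertBy_pairwise x acc hacc)

theorem sorted2_pairwise (xs : List (Int × Int)) :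
    (PySem.List.sorted2 xs (fun e => e.1) (fun e => e.2)).Pairwise
      (fun a b => lexLt b a = false) := by
  have : PySem.List.sorted2 xs (fun e => e.1) (fun e => e.2) =
      xs.foldl (fun acc x => PySem.List.insertBy lexLt x acc) [] := rfl
  rw [this]
  exact foldl_insertBy_pairwise xs [] (List.Pairwise.nil)

-- flushing the fold from a live state splits off the current run
theorem foldl_stepB_some (xs : List (Int × Int)) :
    ∀ (e : Int × Int) (r b nm : Int),
    (fun st => bump st.2.1 st.2.2.1 st.2.2.2) (xs.foldl stepB (some e, r, b, nm)) =
      (b + (bump (r + ((xs.takeWhile (· == e)).length : Int)) 0 0).1 +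
        (runsR (xs.dropWhile (· == e))).1,
       nm + (bump (r + ((xs.takeWhile (· == e)).length : Int)) 0 0).2 +
        (runsR (xs.dropWhile (· == e))).2) := by
  induction xs with
  | nil =>
    intro e r b nm
    simp only [List.foldl, List.takeWhile_nil, List.dropWhile_nil, runsR_nil,
      List.length_nil, Nat.cast_zero, add_zero]
    simp [bump]
    split_ifs <;> simp
  | cons x xs ih =>
    intro e r b nm
    by_cases hx : x = e
    · subst hx
      rw [show (x :: xs).foldl stepB (some x, r, b, nm) = xs.foldl stepB (some x, r + 1, b, nm) by
        simp [List.foldl, stepB]]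
      rw [ih x (r + 1) b nm]
      simp only [List.takeWhile_cons, List.dropWhile_cons, beq_self_eq_true, if_pos,
        List.length_cons]
      push_cast
      ring_nf
    · rw [show (x :: xs).foldl stepB (some e, r, b, nm) =
            xs.foldl stepB (some x, 1, (bump r b nm).1, (bump r b nm).2) by
        simp [List.foldl, stepB, hx]]
      rw [ih x 1 _ _]
      have htw : (x :: xs).takeWhile (· == e) = [] := by
        simp [hx]
      have hdw : (x :: xs).dropWhile (· == e) = x :: xs := by
        simp [hx]
      rw [htw, hdw]
      rw [runsR_cons x xs]
      have hb : bump r b nm = (b + (bump r 0 0).1, nm + (bump r 0 0).2) := by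
        simp [bump]; split_ifs <;> simp
      rw [hb]
      simp; constructor <;> ring

theorem flush_foldl_stepB (L : List (Int × Int)) :
    (fun st => bump st.2.1 st.2.2.1 st.2.2.2) (L.foldl stepB (none, 0, 0, 0)) = runsR L := by
  cases L with
  | nil => simp [List.foldl, bump, runsR_nil]
  | cons e xs =>
    rw [show (e :: xs).foldl stepB (none, 0, 0, 0) = xs.foldl stepB (some e, 1, 0, 0) by
      simp [List.foldl, stepB, bump]]
    rw [foldl_stepB_some xs e 1 0 0]
    rw [runsR_cons e xs]
    simp

theorem head?_dropWhile_false (p : (Int × Int) → Bool) (l : List (Int × Int)) (a : Int × Int)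
    (h : (l.dropWhile p).head? = some a) : p a = false := by
  have hne : l.dropWhile p ≠ [] := by intro hn; rw [hn] at h; simp at h
  have hh := List.head_dropWhile_not p hne
  rw [List.head?_eq_head hne, Option.some.injEq] at h
  rwa [h] at hh

theorem specPair_nil : specPair [] = (0, 0) := by
  simp [specPair, PySem.Set.ofList]

theorem runsR_spec_aux : ∀ (n : Nat) (L : List (Int × Int)), L.length ≤ n →
    L.Pairwise (fun a b => lexLt b a = false) → runsR L = specPair L := by
  intro n
  induction n with
  | zero =>
    intro L hlen _
    have : L = [] := List.eq_nil_of_length_eq_zero (Nat.le_zero.mp hlen)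
    subst this
    rw [runsR_nil, specPair_nil]
  | succ n ih =>
    intro L hlen hpw
    cases L with
    | nil => rw [runsR_nil, specPair_nil]
    | cons e xs =>
      rw [List.pairwise_cons] at hpw
      obtain ⟨he, hxs⟩ := hpw
      set es := xs.takeWhile (· == e) with hes_def
      set rest := xs.dropWhile (· == e) with hrest_def
      have hsplit : es ++ rest = xs := List.takeWhile_append_dropWhile
      have hes : ∀ y ∈ es, y = e := by
        intro y hy
        have := List.mem_takeWhile_imp hy
        exact beq_iff_eq.mp this
      have hrest_sub : rest.Sublist xs := List.dropWhile_sublist _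
      have hrest_pw : rest.Pairwise (fun a b => lexLt b a = false) := hxs.sublist hrest_sub
      have he_rest : e ∉ rest := by
        intro hmem
        cases hr : rest with
        | nil => rw [hr] at hmem; exact absurd hmem (List.not_mem_nil)
        | cons r0 rt =>
          have hr0 : (r0 == e) = false := by
            apply head?_dropWhile_false (· == e) xs r0
            rw [← hrest_def, hr]
            rfl
          have hr0e : r0 ≠ e := by simpa using hr0
          rw [hr] at hmem
          rcases List.mem_cons.mp hmem with rfl | hmem
          · exact hr0e rfl
          · -- e appears after r0 in rest: pairwise gives lexLt e r0 = false
            rw [hr] at hrest_pw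
            rw [List.pairwise_cons] at hrest_pw
            have h1 : lexLt e r0 = false := hrest_pw.1 e hmem
            have hr0xs : r0 ∈ xs := hrest_sub.mem (by rw [hr]; exact List.mem_cons_self)
            have h2 : lexLt r0 e = false := he r0 hr0xs
            exact hr0e (lexLt_antisym e r0 h1 h2).symm
      have hcount_es : es.count e = es.length :=
        List.count_eq_length.mpr (fun b hb => (hes b hb).symm)
      have hcount_e : (e :: xs).count e = es.length + 1 := by
        rw [List.count_cons_self, ← hsplit, List.count_append, hcount_es,
          List.count_eq_zero.mpr he_rest]
      have hcount_ne : ∀ k, k ≠ e → (e :: xs).count k = rest.count k := by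
        intro k hk
        have hz : es.count k = 0 := List.count_eq_zero.mpr (fun hkes => hk (hes k hkes))
        simp [Ne.symm hk, ← hsplit, List.count_append, hz]
      have hperm : (PySem.Set.ofList (e :: xs)).Perm (e :: PySem.Set.ofList rest) := by
        apply (List.perm_ext_iff_of_nodup (PySem.Set.nodup_ofList _) ?_).mpr
        · intro a
          rw [PySem.Set.mem_ofList, List.mem_cons, List.mem_cons, PySem.Set.mem_ofList]
          constructor
          · rintro (rfl | ha)
            · exact Or.inl rfl
            · rw [← hsplit] at ha
              rcases List.mem_append.mp ha with ha | ha
              · exact Or.inl (hes a ha)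
              · exact Or.inr ha
          · rintro (rfl | ha)
            · exact Or.inl rfl
            · exact Or.inr (by rw [← hsplit]; exact List.mem_append_right _ ha)
        · exact List.Nodup.cons (fun h => he_rest ((PySem.Set.mem_ofList _ _).mp h))
            (PySem.Set.nodup_ofList _)
      have hrest_len : rest.length ≤ n := by
        have h1 := List.length_dropWhile_le (· == e) xs
        rw [← hrest_def] at h1
        have h2 : xs.length ≤ n := by simpa using hlen
        omega
      have hIH : runsR rest = specPair rest := ih rest hrest_len hrest_pw
      have hcongr : ∀ (p q : Nat → Bool), (∀ m, p m = q m) →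
          (PySem.Set.ofList rest).countP (fun k => p ((e :: xs).count k)) =
          (PySem.Set.ofList rest).countP (fun k => q (rest.count k)) := by
        intro p q hpq
        apply List.countP_congr
        intro x hx
        have hxr : x ∈ rest := (PySem.Set.mem_ofList _ _).mp hx
        have hxe : x ≠ e := fun h => he_rest (h ▸ hxr)
        rw [hcount_ne x hxe, hpq]
      rw [runsR_cons, ← hes_def, ← hrest_def, hIH]
      unfold specPair
      rw [(hperm.countP_eq _), (hperm.countP_eq _), List.countP_cons, List.countP_cons]
      rw [hcongr (fun m => ((m : Int) == 1)) (fun m => ((m : Int) == 1)) (fun _ => rfl)]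
      rw [hcongr (fun m => decide ((2:Int) < (m : Int))) (fun m => decide ((2:Int) < (m : Int)))
        (fun _ => rfl)]
      have hpair : ∀ (u v x y : Int), u = x → v = y → (u, v) = (x, y) := by
        intro u v x y h1 h2; rw [h1, h2]
      apply hpair
      · rw [hcount_e]
        simp only [bump, beq_iff_eq]
        push_cast
        split_ifs <;> push_cast <;> omega
      · rw [hcount_e]
        simp only [bump, beq_iff_eq, decide_eq_true_eq]
        push_cast
        split_ifs <;> push_cast <;> omega

theorem runsR_spec (L : List (Int × Int))
    (hL : L.Pairwise (fun a b => lexLt b a = false)) : runsR L = specPair L :=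
  runsR_spec_aux L.length L (Nat.le_refl _) hL

theorem specPair_perm (L M : List (Int × Int)) (h : L.Perm M) : specPair L = specPair M := by
  have hmem : ∀ a, a ∈ PySem.Set.ofList L ↔ a ∈ PySem.Set.ofList M := by
    intro a
    rw [PySem.Set.mem_ofList, PySem.Set.mem_ofList]
    exact ⟨fun hx => h.mem_iff.mp hx, fun hx => h.mem_iff.mpr hx⟩
  have hperm : (PySem.Set.ofList L).Perm (PySem.Set.ofList M) :=
    (List.perm_ext_iff_of_nodup (PySem.Set.nodup_ofList L) (PySem.Set.nodup_ofList M)).mpr hmem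
  have hcnt : ∀ k, L.count k = M.count k := fun k => h.count_eq k
  unfold specPair
  congr 1
  · congr 1
    rw [hperm.countP_eq]
    exact List.countP_congr (fun x _ => by rw [hcnt x])
  · congr 1
    rw [hperm.countP_eq]
    exact List.countP_congr (fun x _ => by rw [hcnt x])

theorem normEdge_eq (u v : Int) : normEdge u v = (min u v, max u v) := by
  unfold normEdge
  split_ifs with h
  · rw [min_eq_left h, max_eq_right h]
  · have h' : v ≤ u := by omega
    rw [min_eq_right h', max_eq_left h']

theorem a_eq_spec (quads : List (Int × Int × Int × Int)) :
    check_manifold quads = specPair (edgesAll quads) := by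
  unfold check_manifold
  have hinner : ∀ (d : PySem.Dict (Int × Int) Int) (q : Int × Int × Int × Int),
      (PySem.List.pyRange 0 4 1).foldl (fun d i =>
        let e := (min (tupGet q i) (tupGet q (PySem.Int.mod (i + 1) 4)),
                  max (tupGet q i) (tupGet q (PySem.Int.mod (i + 1) 4)))
        d.modify e 0 (· + 1)) d =
      (edgesOf q).foldl (fun d e => d.modify e 0 (· + 1)) d := by
    intro d q
    rfl
  simp only [hinner]
  have hdict : (quads.foldl (fun d q => (edgesOf q).foldl (fun d e => d.modify e 0 (· + 1)) d)
      (PySem.Dict.empty : PySem.Dict (Int × Int) Int)) = PySem.Dict.counter (edgesAll quads) := by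
    unfold edgesAll
    rw [PySem.Dict.counter_eq_foldl]
    rw [List.foldl_flatMap]
  rw [hdict]
  have hvals : (PySem.Dict.counter (edgesAll quads)).values =
      (PySem.Set.ofList (edgesAll quads)).map (fun k => ((edgesAll quads).count k : Int)) := by
    show (PySem.Dict.counter (edgesAll quads)).items.map (·.2) = _
    rw [PySem.Dict.items_counter]
    rw [List.map_map]
    rfl
  rw [hvals]
  rw [PySem.List.foldl_beq_add_one]
  rw [PySem.List.foldl_ite_add_one (p := fun c => c > 2)]
  unfold specPair
  have hpair : ∀ (u v x y : Int), u = x → v = y → (u, v) = (x, y) := by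
    intro u v x y h1 h2; rw [h1, h2]
  apply hpair
  · rw [List.count_eq_countP, List.countP_map]
    simp only [Int.zero_add]
    rfl
  · rw [List.countP_map]
    simp only [Int.zero_add]
    rfl

theorem edgesB_eq (quads : List (Int × Int × Int × Int)) : edgesB quads = edgesAll quads := by
  unfold edgesB edgesAll
  have hinner : ∀ (acc : List (Int × Int)) (q : Int × Int × Int × Int),
      ([(q.1, q.2.1), (q.2.1, q.2.2.1), (q.2.2.1, q.2.2.2), (q.2.2.2, q.1)].foldl
        (fun acc uv => acc ++ [normEdge uv.1 uv.2]) acc) = acc ++ edgesOf q := by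
    intro acc q
    simp [List.foldl, edgesOf, normEdge_eq]
  simp only [hinner]
  rw [PySem.List.foldl_append_eq_flatMap]
  rfl

theorem b_eq_spec (quads : List (Int × Int × Int × Int)) :
    check_manifold_alt quads = specPair (edgesAll quads) := by
  have h1 := flush_foldl_stepB (PySem.List.sorted2 (edgesB quads) (fun e => e.1) (fun e => e.2))
  simp only at h1
  have h2 : check_manifold_alt quads =
      runsR (PySem.List.sorted2 (edgesB quads) (fun e => e.1) (fun e => e.2)) := h1
  rw [h2, runsR_spec _ (sorted2_pairwise _)]
  rw [specPair_perm _ _ (PySem.List.sorted2_perm _ _ _ _), edgesB_eq]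

-- ===== VERDICT (by name: the statement is the Claim_ definition above) =====
theorem check_manifold_spec : Claim_equal_check_manifold := by
  intro quads _
  unfold Spec_check_manifold
  rw [a_eq_spec, b_eq_spec]
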